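-- pv_equiv track=rewrite | github.com/ankit2711/stock_screener | universe_ai.py | tv_url_for
-- ===== SOURCE A (Python) =====
-- def tv_url_for(yf_ticker: str) -> str:
--     """
--     Best-effort TradingView chart URL for an AI theme ticker.
--     Reverses the yfinance suffix back to the TV exchange prefix.
--     """
--     suffix_to_exchange = {
--         ".HK":  "HKEX",
--         ".KS":  "KRX",
--         ".T":   "TSE",
--         ".TW":  "TWSE",
--         ".TWO": "TPEX",
--         ".SS":  "SSE",
--         ".SZ":  "SZSE",
--         ".SI":  "SGX",
--         ".AX":  "ASX",
--         ".L":   "LSE",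
--         ".DE":  "XETR",
--         ".MI":  "MIL",
--         ".ST":  "OMXSTO",
--         ".KL":  "MYX",
--         ".VI":  "VIE",
--         ".TO":  "TSX",
--         ".PA":  "EURONEXT",
--         ".AS":  "EURONEXT",
--         ".SA":  "BMFBOVESPA",
--     }
--     for suffix, exchange in suffix_to_exchange.items():
--         if yf_ticker.endswith(suffix):
--             sym = yf_ticker[: -len(suffix)]
--             return f"https://www.tradingview.com/chart/?symbol={exchange}:{sym}"
--     # US — plain symbol
--     return f"https://www.tradingview.com/chart/?symbol={yf_ticker}"
-- ===== SOURCE B (Python) =====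
-- def tv_url_for(yf_ticker: str) -> str:
--     """
--     Best-effort TradingView chart URL for an AI theme ticker.
--     Looks up the yfinance suffix (text from the last '.') in one hash probe.
--     """
--     suffix_to_exchange = {
--         ".HK":  "HKEX",
--         ".KS":  "KRX",
--         ".T":   "TSE",
--         ".TW":  "TWSE",
--         ".TWO": "TPEX",
--         ".SS":  "SSE",
--         ".SZ":  "SZSE",
--         ".SI":  "SGX",
--         ".AX":  "ASX",
--         ".L":   "LSE",
--         ".DE":  "XETR",
--         ".MI":  "MIL",
--         ".ST":  "OMXSTO",
--         ".KL":  "MYX",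
--         ".VI":  "VIE",
--         ".TO":  "TSX",
--         ".PA":  "EURONEXT",
--         ".AS":  "EURONEXT",
--         ".SA":  "BMFBOVESPA",
--     }
--     idx = yf_ticker.rfind('.')
--     if idx >= 0:
--         exchange = suffix_to_exchange.get(yf_ticker[idx:])
--         if exchange is not None:
--             return f"https://www.tradingview.com/chart/?symbol={exchange}:{yf_ticker[:idx]}"
--     return f"https://www.tradingview.com/chart/?symbol={yf_ticker}"
-- ===== Notes on version B (the rewrite author's own statement) =====
-- stated objective: idiomatic
-- what changed: Replaces the scan over all 19 suffix keys with endswith by extracting the text from the last dot (rfind) and doing a single dict lookup of that suffix.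
import Mathlib
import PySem

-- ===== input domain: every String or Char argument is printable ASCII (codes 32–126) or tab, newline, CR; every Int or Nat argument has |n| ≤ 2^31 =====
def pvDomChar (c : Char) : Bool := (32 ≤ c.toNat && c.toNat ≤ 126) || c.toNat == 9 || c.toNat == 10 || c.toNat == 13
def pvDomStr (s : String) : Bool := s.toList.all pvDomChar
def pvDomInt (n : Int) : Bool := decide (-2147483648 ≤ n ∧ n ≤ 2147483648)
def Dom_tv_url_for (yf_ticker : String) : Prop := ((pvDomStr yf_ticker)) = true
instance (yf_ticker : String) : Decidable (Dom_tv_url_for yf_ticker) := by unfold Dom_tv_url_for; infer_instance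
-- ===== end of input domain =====

-- B replaces A's scan over all 19 suffix keys with endswith by one rfind('.') plus a single
-- dict lookup of the extracted suffix (same return value everywhere; objective: idiomatic).

-- the suffix → exchange table both Pythons embed as a dict literal
def tvTable : List (String × String) :=
  [(".HK", "HKEX"), (".KS", "KRX"), (".T", "TSE"), (".TW", "TWSE"), (".TWO", "TPEX"),
   (".SS", "SSE"), (".SZ", "SZSE"), (".SI", "SGX"), (".AX", "ASX"), (".L", "LSE"),
   (".DE", "XETR"), (".MI", "MIL"), (".ST", "OMXSTO"), (".KL", "MYX"), (".VI", "VIE"),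
   (".TO", "TSX"), (".PA", "EURONEXT"), (".AS", "EURONEXT"), (".SA", "BMFBOVESPA")]

-- ===== PORT A =====
-- A's 'for suffix, exchange in suffix_to_exchange.items(): if yf_ticker.endswith(suffix): …'
def tvLoopA (yf_ticker : String) : List (String × String) → String
  | [] => "https://www.tradingview.com/chart/?symbol=" ++ yf_ticker
  | (suffix, exchange) :: rest =>
    if PySem.Str.endswith yf_ticker suffix then
      -- sym = yf_ticker[: -len(suffix)]
      "https://www.tradingview.com/chart/?symbol=" ++ exchange ++ ":" ++
        PySem.Str.slice yf_ticker none (some (-(PySem.Str.len suffix : Int)))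
    else tvLoopA yf_ticker rest

def tv_url_for (yf_ticker : String) : String := tvLoopA yf_ticker tvTable

-- ===== PORT B =====
def tv_url_for_alt (yf_ticker : String) : String :=
  let idx := PySem.Str.rfind yf_ticker "."
  if 0 ≤ idx then
    match PySem.Dict.get? (PySem.Dict.mk tvTable) (PySem.Str.slice yf_ticker (some idx) none) with
    | some exchange =>
        "https://www.tradingview.com/chart/?symbol=" ++ exchange ++ ":" ++
          PySem.Str.slice yf_ticker none (some (PySem.Str.rfind yf_ticker "."))
    | none => "https://www.tradingview.com/chart/?symbol=" ++ yf_ticker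
  else "https://www.tradingview.com/chart/?symbol=" ++ yf_ticker

-- ===== PRECONDITION & SPEC =====
def Spec_tv_url_for (yf_ticker : String) (out : String) : Prop := out = tv_url_for_alt yf_ticker
instance (yf_ticker : String) (out : String) : Decidable (Spec_tv_url_for yf_ticker out) := by unfold Spec_tv_url_for; infer_instance

-- ===== CLAIM (what is proved, stated in full; the proofs are below) =====
def Claim_equal_tv_url_for : Prop := ∀ (yf_ticker : String), Dom_tv_url_for yf_ticker → Spec_tv_url_for yf_ticker (tv_url_for yf_ticker)

-- ===== LEMMAS AND PROOFS =====

-- the two defining equations of PySem.Chars.rfind.go (hold by rfl)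
theorem rfind_go_zero (L sub : List Char) :
    PySem.Chars.rfind.go L sub 0 = if sub.isPrefixOf L then 0 else -1 := rfl

theorem rfind_go_succ (L sub : List Char) (j : Nat) :
    PySem.Chars.rfind.go L sub (j + 1) =
      if sub.isPrefixOf (L.drop (j + 1)) then ((j + 1 : Nat) : Int)
      else PySem.Chars.rfind.go L sub j := rfl

-- ['.'] is a (boolean) prefix of M exactly when M starts with '.'
theorem singleton_isPrefixOf_iff (c : Char) (M : List Char) :
    List.isPrefixOf [c] M = true ↔ M.head? = some c := by
  cases M with
  | nil => simp
  | cons a t =>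
    show ((c == a) && true) = true ↔ (a :: t).head? = some c
    constructor
    · intro h; simp at h; simp [h]
    · intro h; simp at h; simp [h]

-- spec of PySem.Chars.rfind.go for a single-character needle
theorem rfind_go_spec (L : List Char) (c : Char) : ∀ j : Nat,
    (PySem.Chars.rfind.go L [c] j = -1 ∧ ∀ i ≤ j, L.drop i ≠ [] → (L.drop i).head? ≠ some c) ∨
    (∃ m : Nat, PySem.Chars.rfind.go L [c] j = (m : Int) ∧ m ≤ j ∧ (L.drop m).head? = some c ∧
      ∀ i, m < i → i ≤ j → (L.drop i).head? ≠ some c) := by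
  intro j
  induction j with
  | zero =>
    by_cases h : List.isPrefixOf [c] L = true
    · right; exact ⟨0, by rw [rfind_go_zero]; simp [h], Nat.le_refl 0,
        by simpa using (singleton_isPrefixOf_iff c L).1 h, by omega⟩
    · left
      refine ⟨by rw [rfind_go_zero]; simp [h], ?_⟩
      intro i hi _ hc
      interval_cases i
      exact h ((singleton_isPrefixOf_iff c L).2 (by simpa using hc))
  | succ j ih =>
    by_cases h : List.isPrefixOf [c] (L.drop (j + 1)) = true
    · right
      exact ⟨j + 1, by rw [rfind_go_succ]; simp [h], Nat.le_refl _,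
        (singleton_isPrefixOf_iff c _).1 h, by omega⟩
    · have hstep : PySem.Chars.rfind.go L [c] (j + 1) = PySem.Chars.rfind.go L [c] j := by
        simp [PySem.Chars.rfind.go, h]
      have hno : (L.drop (j + 1)).head? ≠ some c := fun hc =>
        h ((singleton_isPrefixOf_iff c _).2 hc)
      rcases ih with ⟨h1, h2⟩ | ⟨m, h1, h2, h3, h4⟩
      · left
        refine ⟨hstep.trans h1, ?_⟩
        intro i hi hne
        rcases Nat.lt_or_ge i (j + 1) with hlt | hge
        · exact h2 i (by omega) hne
        · have : i = j + 1 := by omega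
          subst this; exact hno
      · right
        refine ⟨m, hstep.trans h1, by omega, h3, ?_⟩
        intro i hmi hij
        rcases Nat.lt_or_ge i (j + 1) with hlt | hge
        · exact h4 i hmi (by omega)
        · have : i = j + 1 := by omega
          subst this; exact hno

-- head? of a drop = getElem?
theorem head?_drop (L : List Char) (i : Nat) : (L.drop i).head? = L[i]? := by
  simp [List.head?_drop]

-- spec of rfind on a single-character needle: -1 and no occurrence, or the LAST occurrence
theorem rfind_spec (L : List Char) (c : Char) :
    (PySem.Chars.rfind L [c] = -1 ∧ c ∉ L) ∨
    (∃ m : Nat, PySem.Chars.rfind L [c] = (m : Int) ∧ L[m]? = some c ∧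
      ∀ i, m < i → L[i]? ≠ some c) := by
  have h := rfind_go_spec L c L.length
  rcases h with ⟨h1, h2⟩ | ⟨m, h1, h2, h3, h4⟩
  · left
    refine ⟨h1, fun hc => ?_⟩
    obtain ⟨i, hi, hgi⟩ := List.getElem_of_mem hc
    exact h2 i (by omega) (by simp [List.drop_eq_nil_iff]; omega)
      (by rw [head?_drop]; simp [List.getElem?_eq_getElem hi, hgi])
  · right
    refine ⟨m, h1, by rw [← head?_drop]; exact h3, ?_⟩
    intro i hmi hci
    rcases Nat.lt_or_ge i L.length with hlt | hge
    · exact h4 i hmi (by omega) (by rw [head?_drop]; exact hci)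
    · rw [List.getElem?_eq_none hge] at hci; simp at hci

-- a key of the shape '.'·w with w dot-free matches endswith iff it is exactly the
-- text from the LAST dot of yf_ticker
theorem endswith_dotkey (yf k : String) (m : Nat)
    (hk : (yf.toList)[m]? = some '.')
    (hlast : ∀ i, m < i → (yf.toList)[i]? ≠ some '.')
    (hhead : k.toList.head? = some '.') (htail : '.' ∉ k.toList.tail) :
    PySem.Str.endswith yf k = true ↔ yf.toList.drop m = k.toList := by
  obtain ⟨w, hw⟩ : ∃ w, k.toList = '.' :: w := by
    cases hkl : k.toList with
    | nil => rw [hkl] at hhead; simp at hhead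
    | cons a t => rw [hkl] at hhead; simp at hhead; exact ⟨t, by rw [hhead]⟩
  rw [hw] at htail; simp at htail
  have hmlt : m < yf.toList.length := by
    by_contra hge
    rw [List.getElem?_eq_none (by omega)] at hk; simp at hk
  constructor
  · intro he
    have hsuf : k.toList <:+ yf.toList := by
      have := PySem.Str.endswith_eq yf k
      rw [he] at this
      exact (PySem.Chars.endswith_iff _ _).1 this.symm
    obtain ⟨p, hp⟩ := hsuf
    rw [hw] at hp
    -- the dot of the key sits at index p.length, with only w (dot-free) after it
    have hdotp : (yf.toList)[p.length]? = some '.' := by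
      rw [← hp]; simp
    have hnomore : ∀ i, p.length < i → (yf.toList)[i]? ≠ some '.' := by
      intro i hi hci
      rw [← hp] at hci
      rw [List.getElem?_append_right (by omega)] at hci
      cases hni : i - p.length with
      | zero => omega
      | succ n =>
        rw [hni] at hci
        simp at hci
        exact htail (List.mem_of_getElem? hci)
    -- so p.length is the last dot, i.e. equals m
    have hpm : p.length = m := by
      by_contra hne
      rcases Nat.lt_or_ge p.length m with hlt | hge
      · exact hnomore m hlt hk
      · exact hlast p.length (by omega) hdotp
    rw [← hp, hw, ← hpm, List.drop_left]
  · intro hd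
    have hsuf : k.toList <:+ yf.toList := by
      rw [← hd]; exact List.drop_suffix m yf.toList
    rw [PySem.Str.endswith_eq]
    exact (PySem.Chars.endswith_iff _ _).2 hsuf

-- shape of every key in the table, checked by computation
def tvKeyShape (k : String) : Prop := k.toList.head? = some '.' ∧ '.' ∉ k.toList.tail

-- the no-dot case: every endswith test in A's loop fails
theorem loopA_nodot (yf : String) (hnd : '.' ∉ yf.toList) :
    ∀ T : List (String × String), (∀ p ∈ T, tvKeyShape p.1) →
      tvLoopA yf T = "https://www.tradingview.com/chart/?symbol=" ++ yf := by
  intro T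
  induction T with
  | nil => intro _; rfl
  | cons p rest ih =>
    intro hT
    obtain ⟨hhead, _⟩ := hT p (by simp)
    have hfail : PySem.Str.endswith yf p.1 = false := by
      by_contra h
      have he : PySem.Str.endswith yf p.1 = true := by
        cases hb : PySem.Str.endswith yf p.1 with
        | false => exact absurd hb h
        | true => rfl
      have hsuf : p.1.toList <:+ yf.toList := by
        have := PySem.Str.endswith_eq yf p.1
        rw [he] at this
        exact (PySem.Chars.endswith_iff _ _).1 this.symm
      have hdot : '.' ∈ p.1.toList := by
        cases hkl : p.1.toList with
        | nil => rw [hkl] at hhead; simp at hhead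
        | cons a t => rw [hkl] at hhead; simp at hhead; simp [hhead]
      exact hnd (hsuf.subset hdot)
    cases p with
    | mk k v =>
      simp only [tvLoopA, hfail, Bool.false_eq_true, if_false]
      exact ih (fun q hq => hT q (by simp [hq]))

-- the dot case: A's scan equals B's single lookup of the last-dot suffix
theorem loopA_dot (yf : String) (m : Nat)
    (hk : (yf.toList)[m]? = some '.')
    (hlast : ∀ i, m < i → (yf.toList)[i]? ≠ some '.') :
    ∀ T : List (String × String), (∀ p ∈ T, tvKeyShape p.1) →
      tvLoopA yf T =
        match PySem.Dict.get? (PySem.Dict.mk T) (PySem.Str.slice yf (some (m : Int)) none) with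
        | some exchange =>
            "https://www.tradingview.com/chart/?symbol=" ++ exchange ++ ":" ++
              PySem.Str.slice yf none (some (m : Int))
        | none => "https://www.tradingview.com/chart/?symbol=" ++ yf := by
  have hmlt : m < yf.toList.length := by
    by_contra hge
    rw [List.getElem?_eq_none (by omega)] at hk; simp at hk
  have hsufL : (PySem.Str.slice yf (some (m : Int)) none).toList = yf.toList.drop m := by
    rw [PySem.Str.toList_slice, PySem.Chars.slice_eq_listSlice, PySem.List.slice_from_natCast]
  intro T
  induction T with
  | nil => intro _; rfl
  | cons p rest ih =>
    intro hT
    obtain ⟨hhead, htail⟩ := hT p (by simp)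
    cases p with
    | mk k v =>
      have hiff := endswith_dotkey yf k m hk hlast hhead htail
      by_cases heq : yf.toList.drop m = k.toList
      · -- this key matches: both sides return the same URL
        have he : PySem.Str.endswith yf k = true := hiff.2 heq
        have hkey : (k == PySem.Str.slice yf (some (m : Int)) none) = true := by
          have : k = PySem.Str.slice yf (some (m : Int)) none := by
            apply String.toList_injective
            rw [hsufL, heq]
          simp [this]
        have hmlt' : m < yf.length := by simpa using hmlt
        have hlenN : k.length = yf.length - m := by
          have h' := congrArg List.length heq
          simp at h'
          omega
        have hsym : PySem.Str.slice yf none (some (-(PySem.Str.len k : Int))) =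
            PySem.Str.slice yf none (some (m : Int)) := by
          apply String.toList_injective
          rw [PySem.Str.toList_slice, PySem.Str.toList_slice,
            PySem.Chars.slice_eq_listSlice, PySem.Chars.slice_eq_listSlice]
          simp only [PySem.Str.len_eq, String.length_toList]
          rw [PySem.List.slice_to_neg_natCast _ _ (by omega : 0 < k.length),
            PySem.List.slice_to_natCast, hlenN]
          congr 1
          simp only [String.length_toList]
          omega
        simp only [tvLoopA, he, if_true, PySem.Dict.get?_mk_cons, hkey, hsym]
      · -- this key does not match: both sides skip it
        have hfail : PySem.Str.endswith yf k = false := by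
          cases hb : PySem.Str.endswith yf k with
          | false => rfl
          | true => exact absurd (hiff.1 hb) heq
        have hkey : (k == PySem.Str.slice yf (some (m : Int)) none) = false := by
          apply beq_eq_false_iff_ne.2
          intro hkeq
          apply heq
          rw [← hsufL, hkeq]
        simp only [tvLoopA, hfail, Bool.false_eq_true, if_false, PySem.Dict.get?_mk_cons, hkey]
        exact ih (fun q hq => hT q (by simp [hq]))

-- every key of the literal table has the dot-key shape
theorem tvTable_shape : ∀ p ∈ tvTable, tvKeyShape p.1 := by
  unfold tvKeyShape
  decide

-- ===== VERDICT (by name: the statement is the Claim_ definition above) =====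
theorem tv_url_for_spec : Claim_equal_tv_url_for := by
  intro yf _
  unfold Spec_tv_url_for tv_url_for tv_url_for_alt
  rw [PySem.Str.rfind_eq, show (".").toList = ['.'] from rfl]
  rcases rfind_spec yf.toList '.' with ⟨h1, h2⟩ | ⟨m, h1, h2, h3⟩
  · rw [h1, if_neg (by omega)]
    exact loopA_nodot yf h2 tvTable tvTable_shape
  · rw [h1, if_pos (by positivity)]
    exact loopA_dot yf m h2 h3 tvTable tvTable_shape
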